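-- pv_equiv track=rewrite | github.com/KatyH820/AllICS33Projects | q4helper/q4solution.py | slice_gen
-- ===== SOURCE A (Python) =====
-- def slice_gen(iterable, start, stop, step):
--     assert step > 0, "Step must be positive";assert start >= 0,'Start must be non negative';assert stop >= 0, 'Stop must be non negative'
--     gen = iter(enumerate(iterable))
--     for i in range(start):next(gen)
--     for i in range(start, stop, step):
--         try:
--             n,a = next(gen)
--             if n == i:
--                 yield a
--             for j in range(step-1):
--                 next(gen)
--         except StopIteration:
--             return
-- ===== SOURCE B (Python) =====
-- def slice_gen(iterable, start, stop, step):
--     assert step > 0, "Step must be positive"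
--     assert start >= 0, 'Start must be non negative'
--     assert stop >= 0, 'Stop must be non negative'
--     it = iter(iterable)
--     for _ in range(start):
--         next(it)
--     for offset, val in enumerate(it):
--         if start + offset >= stop:
--             return
--         if offset % step == 0:
--             yield val
-- ===== Notes on version B (the rewrite author's own statement) =====
-- stated objective: simpler
-- what changed: A drives a second generator loop over range(start, stop, step) that yields one element and then jump-skips step-1 items per range index; B replaces that whole chunked walk by a single enumerate pass over the remaining iterator, stopping when start+offset reaches stop and yielding whenever offset % step == 0.
import Mathlib
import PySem

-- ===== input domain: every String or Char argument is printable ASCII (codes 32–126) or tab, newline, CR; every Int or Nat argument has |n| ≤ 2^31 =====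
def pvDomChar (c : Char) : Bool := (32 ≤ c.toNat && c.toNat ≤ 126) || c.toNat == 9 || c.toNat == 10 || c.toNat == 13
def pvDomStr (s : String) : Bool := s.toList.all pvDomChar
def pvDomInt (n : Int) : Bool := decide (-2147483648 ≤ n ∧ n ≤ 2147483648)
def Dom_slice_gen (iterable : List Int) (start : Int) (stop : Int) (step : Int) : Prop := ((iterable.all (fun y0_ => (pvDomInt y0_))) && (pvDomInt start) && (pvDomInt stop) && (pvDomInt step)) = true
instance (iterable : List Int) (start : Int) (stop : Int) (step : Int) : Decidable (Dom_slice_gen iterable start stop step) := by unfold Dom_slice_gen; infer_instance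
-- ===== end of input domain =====

-- B replaces A's jump-ahead chunked consumption (one range item + step-1 skipped next() calls
-- per yield) by a single enumerate pass over the remaining iterator with an offset-mod-step test
-- (objective: simpler).

-- ===== PORT A =====
-- A's second loop 'for i in range(start, stop, step)': one range item consumes the pair (n,a)
-- (yield if n == i) and then step-1 further pairs; StopIteration anywhere in the chunk ends the
-- generator (the length test models the partial skip raising StopIteration: yielded ys stands).
def pvALoop (step : Int) : List Int → List (Int × Int) → List Int
  | [], _ => []
  | _ :: _, [] => []
  | i :: is, (n, a) :: rest =>
      let ys := if n = i then [a] else []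
      if rest.length < (step - 1).toNat then ys
      else ys ++ pvALoop step is (rest.drop (step - 1).toNat)

def slice_gen (iterable : List Int) (start : Int) (stop : Int) (step : Int) : List Int :=
  -- gen = iter(enumerate(iterable)); for i in range(start): next(gen)  (Pre_ rules out exhaustion here)
  let gen := (PySem.List.enumerate iterable).drop start.toNat
  pvALoop step (PySem.List.pyRange start stop step) gen

-- ===== PORT B =====
-- B's loop 'for offset, val in enumerate(it)': stop as soon as start+offset >= stop,
-- yield when offset % step == 0.
def pvBLoop (start stop step : Int) : Int → List Int → List Int
  | _, [] => []
  | off, v :: rest =>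
      if stop ≤ start + off then []
      else (if PySem.Int.mod off step = 0 then [v] else []) ++ pvBLoop start stop step (off + 1) rest

def slice_gen_alt (iterable : List Int) (start : Int) (stop : Int) (step : Int) : List Int :=
  -- it = iter(iterable); for _ in range(start): next(it)  (Pre_ rules out exhaustion here)
  pvBLoop start stop step 0 (iterable.drop start.toNat)

-- ===== PRECONDITION & SPEC =====
-- Pre_ excludes exactly the inputs where A raises: step ≤ 0, start < 0 or stop < 0 fail A's
-- asserts (AssertionError), and start > len(iterable) exhausts the generator in the initial
-- skip loop, where the StopIteration becomes a RuntimeError.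
def Pre_slice_gen (iterable : List Int) (start : Int) (stop : Int) (step : Int) : Prop :=
  1 ≤ step ∧ 0 ≤ start ∧ 0 ≤ stop ∧ start ≤ (iterable.length : Int)
instance (iterable : List Int) (start : Int) (stop : Int) (step : Int) : Decidable (Pre_slice_gen iterable start stop step) := by unfold Pre_slice_gen; infer_instance

def pvWitness_slice_gen : List Int × Int × Int × Int := ([10, 20, 30, 40, 50], 1, 5, 2)

def Spec_slice_gen (iterable : List Int) (start : Int) (stop : Int) (step : Int) (out : List Int) : Prop := out = slice_gen_alt iterable start stop step
instance (iterable : List Int) (start : Int) (stop : Int) (step : Int) (out : List Int) : Decidable (Spec_slice_gen iterable start stop step out) := by unfold Spec_slice_gen; infer_instance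

-- ===== CLAIM (what is proved, stated in full; the proofs are below) =====
def Claim_equal_slice_gen : Prop := ∀ (iterable : List Int) (start : Int) (stop : Int) (step : Int), Dom_slice_gen iterable start stop step → Pre_slice_gen iterable start stop step → Spec_slice_gen iterable start stop step (slice_gen iterable start stop step)

-- ===== LEMMAS AND PROOFS =====

theorem pvPyRange_pos_eq_nil {a b s : Int} (hs : 0 < s) (hba : b ≤ a) :
    PySem.List.pyRange a b s = [] := by
  rw [PySem.List.pyRange_of_pos a b hs]
  simp [Int.not_lt.mpr hba]

theorem pvPyRange_pos_cons {a b s : Int} (hs : 0 < s) (hab : a < b) :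
    PySem.List.pyRange a b s = a :: PySem.List.pyRange (a + s) b s := by
  rw [PySem.List.pyRange_of_pos a b hs, PySem.List.pyRange_of_pos (a + s) b hs]
  have hcount : (if a < b then ((b - a + s - 1) / s).toNat else 0)
      = (if a + s < b then ((b - (a + s) + s - 1) / s).toNat else 0) + 1 := by
    rw [if_pos hab]
    by_cases h2 : a + s < b
    · rw [if_pos h2]
      have hkey : (b - a + s - 1) / s = (b - (a + s) + s - 1) / s + 1 := by
        have : b - a + s - 1 = (b - (a + s) + s - 1) + 1 * s := by ring
        rw [this, Int.add_mul_ediv_right _ _ (ne_of_gt hs)]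
      have hpos : 0 ≤ (b - (a + s) + s - 1) / s :=
        Int.ediv_nonneg (by omega) (le_of_lt hs)
      omega
    · rw [if_neg h2]
      have h1 : (1 : Int) ≤ (b - a + s - 1) / s :=
        (Int.le_ediv_iff_mul_le hs).mpr (by omega)
      have h2' : (b - a + s - 1) / s < 2 :=
        (Int.ediv_lt_iff_lt_mul hs).mpr (by omega)
      omega
  rw [hcount, List.range_succ_eq_map]
  simp only [List.map_cons, List.map_map]
  refine List.cons_eq_cons.mpr ⟨by simp, ?_⟩
  apply List.map_congr_left
  intro k _
  simp only [Function.comp_apply]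
  push_cast
  ring

theorem pvEnumerate_drop (xs : List Int) : ∀ (k : Nat) (s : Int),
    (PySem.List.enumerate xs s).drop k = PySem.List.enumerate (xs.drop k) (s + k) := by
  induction xs with
  | nil => intro k s; simp [PySem.List.enumerate_nil]
  | cons x xs ih =>
      intro k s
      cases k with
      | zero => simp
      | succ k =>
          rw [PySem.List.enumerate_cons, List.drop_succ_cons, List.drop_succ_cons, ih k (s + 1)]
        
          congr 1
          push_cast
          ring

-- shift: the stopping index start+off and off's residue mod step are invariant under
-- moving a whole step from off to start
theorem pvBLoop_shift {start stop step : Int} (hs : 0 < step) :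
    ∀ (l : List Int) (off : Int),
    pvBLoop start stop step off l = pvBLoop (start + step) stop step (off - step) l := by
  intro l
  induction l with
  | nil => intro off; simp [pvBLoop]
  | cons v r ih =>
      intro off
      rw [pvBLoop, pvBLoop]
      have h1 : start + off = (start + step) + (off - step) := by ring
      have h2 : PySem.Int.mod off step = PySem.Int.mod (off - step) step := by
        rw [PySem.Int.mod_eq_emod_of_pos hs, PySem.Int.mod_eq_emod_of_pos hs,
          Int.sub_emod_right]
      rw [← h1, h2, ih (off + 1)]
      have h3 : off + 1 - step = off - step + 1 := by ring
      rw [h3]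

theorem pvBLoop_stop {start stop step : Int} (h : stop ≤ start + step) (l : List Int) :
    pvBLoop start stop step step l = [] := by
  cases l with
  | nil => simp [pvBLoop]
  | cons v r => simp [pvBLoop, h]

-- skipping: from offset c (1 ≤ c ≤ step) the loop yields nothing until offset step,
-- i.e. it just drops step - c elements (or ends when the list or the stop bound runs out)
theorem pvBLoop_skip : ∀ (k : Nat) (start stop step c : Int) (rest : List Int),
    0 < step → 1 ≤ c → c ≤ step → (step - c).toNat = k →
    pvBLoop start stop step c rest
      = if rest.length < k then [] else pvBLoop start stop step step (rest.drop k) := by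
  intro k
  induction k with
  | zero =>
      intro start stop step c rest hs hc1 hc2 hk
      have : c = step := by omega
      subst this
      simp
  | succ k ih =>
      intro start stop step c rest hs hc1 hc2 hk
      have hclt : c < step := by omega
      cases rest with
      | nil => simp [pvBLoop]
      | cons v r =>
          rw [pvBLoop]
          have hmod : PySem.Int.mod c step ≠ 0 := by
            rw [PySem.Int.mod_eq_emod_of_pos hs, Int.emod_eq_of_lt (by omega) hclt]
            omega
          rw [if_neg hmod]
          by_cases hstop : stop ≤ start + c
          · rw [if_pos hstop]
            by_cases hlen : (v :: r).length < k + 1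
            · rw [if_pos hlen]
            · rw [if_neg hlen, List.drop_succ_cons,
                pvBLoop_stop (by omega) (r.drop k)]
          · rw [if_neg hstop, List.nil_append,
              ih start stop step (c + 1) r hs (by omega) (by omega) (by omega)]
            simp only [List.length_cons, List.drop_succ_cons, Nat.add_lt_add_iff_right]

-- main invariant: A's chunked walk over range(i, stop, step) with the enumerated tail
-- equals B's offset walk over the tail
theorem pvMain : ∀ (N : Nat) (tail : List Int) (i stop step : Int),
    tail.length ≤ N → 0 < step →
    pvALoop step (PySem.List.pyRange i stop step) (PySem.List.enumerate tail i)
      = pvBLoop i stop step 0 tail := by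
  intro N
  induction N with
  | zero =>
      intro tail i stop step hN hs
      have : tail = [] := List.length_eq_zero_iff.mp (by omega)
      subst this
      by_cases hib : i < stop
      · rw [pvPyRange_pos_cons hs hib]
        simp [pvALoop, pvBLoop]
      · rw [pvPyRange_pos_eq_nil hs (by omega)]
        simp [pvALoop, pvBLoop]
  | succ N ih =>
      intro tail i stop step hN hs
      by_cases hib : i < stop
      · cases tail with
        | nil =>
            rw [pvPyRange_pos_cons hs hib]
            simp [pvALoop, pvBLoop]
        | cons v r =>
            rw [pvPyRange_pos_cons hs hib, PySem.List.enumerate_cons]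
            have hlen : (PySem.List.enumerate r (i + 1)).length = r.length := by
              simp [PySem.List.length_enumerate]
            have hdrop : (PySem.List.enumerate r (i + 1)).drop (step - 1).toNat
                = PySem.List.enumerate (r.drop (step - 1).toNat) (i + step) := by
              rw [pvEnumerate_drop]
              congr 1
              have : ((step - 1).toNat : Int) = step - 1 := Int.toNat_of_nonneg (by omega)
              omega
            have hA : pvALoop step (i :: PySem.List.pyRange (i + step) stop step)
                ((i, v) :: PySem.List.enumerate r (i + 1))
                = if (PySem.List.enumerate r (i + 1)).length < (step - 1).toNat then [v]
                  else [v] ++ pvALoop step (PySem.List.pyRange (i + step) stop step)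
                    ((PySem.List.enumerate r (i + 1)).drop (step - 1).toNat) := by
              rw [pvALoop]; simp
            have hB : pvBLoop i stop step 0 (v :: r) = [v] ++ pvBLoop i stop step 1 r := by
              rw [pvBLoop, if_neg (show ¬ stop ≤ i + 0 by omega),
                show PySem.Int.mod 0 step = 0 by
                  rw [PySem.Int.mod_eq_emod_of_pos hs]; simp]
              norm_num
            rw [hA, hB,
              pvBLoop_skip (step - 1).toNat i stop step 1 r hs (by omega) (by omega) rfl]
            rw [hlen, hdrop]
            by_cases hshort : r.length < (step - 1).toNat
            · rw [if_pos hshort, if_pos hshort]; simp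
            · rw [if_neg hshort, if_neg hshort]
              have hba : pvBLoop i stop step step (r.drop (step - 1).toNat)
                  = pvBLoop (i + step) stop step 0 (r.drop (step - 1).toNat) := by
                have := pvBLoop_shift (start := i) (stop := stop) hs
                  (r.drop (step - 1).toNat) step
                simpa using this
              rw [hba, ih (r.drop (step - 1).toNat) (i + step) stop step
                (by simp only [List.length_drop]
                    simp only [List.length_cons] at hN
                    omega) hs]
      · rw [pvPyRange_pos_eq_nil hs (by omega)]
        cases tail with
        | nil => simp [pvALoop, pvBLoop]
        | cons v r =>
            rw [PySem.List.enumerate_cons,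
              show pvALoop step [] ((i, v) :: PySem.List.enumerate r (i + 1)) = [] from rfl,
              pvBLoop, if_pos (show stop ≤ i + 0 by omega)]

-- ===== VERDICT (by name: the statement is the Claim_ definition above) =====
theorem slice_gen_spec : Claim_equal_slice_gen := by
  intro iterable start stop step _hDom hPre
  obtain ⟨hstep, hstart, _hstop, _hlen⟩ := hPre
  unfold Spec_slice_gen slice_gen slice_gen_alt
  have h := pvEnumerate_drop iterable start.toNat 0
  simp only at h
  rw [h]
  have hcast : ((0 : Int) + (start.toNat : Int)) = start := by
    rw [Int.toNat_of_nonneg hstart]; ring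
  rw [hcast]
  exact pvMain (iterable.drop start.toNat).length _ start stop step le_rfl (by omega)
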